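-- pv_equiv track=rewrite | github.com/BruhLemma-Yadecha/competitive-programming | Misc/D_No_More_Good_Segment.py | twoLargest
-- ===== SOURCE A (Python) =====
-- def twoLargest(arr):
--     arr.sort(key=lambda arr: arr[1])
--     result = [arr[0]]
--     for left, right in arr[1:]:
--         if left >= result[-1][1]:
--             result.append((left, right))
--     result.sort(key=lambda arr: arr[1] - arr[0], reverse=True)
--     return result[:2]
-- ===== SOURCE B (Python) =====
-- def twoLargest(arr):
--     # Single pass after the sort: extend the greedy chain and track the two
--     # widest chosen intervals on the fly (strict '>' keeps earlier chain
--     # elements on ties, matching a stable reverse sort by width).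
--     # Like A, this sorts arr in place.
--     arr.sort(key=lambda iv: iv[1])
--     first = arr[0]
--     last_right = first[1]
--     best1, best2 = first, None
--     for iv in arr[1:]:
--         left, right = iv
--         if left >= last_right:
--             last_right = right
--             w = right - left
--             if w > best1[1] - best1[0]:
--                 best1, best2 = iv, best1
--             elif best2 is None or w > best2[1] - best2[0]:
--                 best2 = iv
--     return [best1] if best2 is None else [best1, best2]
-- ===== Notes on version B (the rewrite author's own statement) =====
-- stated objective: alternative
-- what changed: B keeps the initial sort by right endpoint but replaces A's materialised chain list plus second stable reverse sort by a single linear pass that extends the greedy chain and tracks the two widest chosen intervals on the fly with strict '>' comparisons.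
import Mathlib
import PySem

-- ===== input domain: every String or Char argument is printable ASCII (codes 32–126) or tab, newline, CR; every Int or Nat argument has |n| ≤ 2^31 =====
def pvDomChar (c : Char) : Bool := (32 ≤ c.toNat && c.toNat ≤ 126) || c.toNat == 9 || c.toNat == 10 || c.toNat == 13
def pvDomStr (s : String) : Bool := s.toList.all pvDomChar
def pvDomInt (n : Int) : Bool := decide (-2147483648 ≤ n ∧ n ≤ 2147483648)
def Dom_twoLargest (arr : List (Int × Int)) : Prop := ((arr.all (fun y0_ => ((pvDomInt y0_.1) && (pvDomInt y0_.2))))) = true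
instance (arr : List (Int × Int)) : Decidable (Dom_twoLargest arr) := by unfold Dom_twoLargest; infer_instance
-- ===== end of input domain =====

-- B replaces A's final reverse sort of the greedy chain by on-the-fly tracking of the
-- two widest chain intervals in the same pass that builds the chain (alternative
-- decomposition, same asymptotic cost). Both A and B sort the argument list in place
-- (Python side); the equivalence proved here is about the return value.

-- ===== PORT A =====
-- result[-1]: result is always nonempty (starts as [arr[0]]), so getLastD's default is never used
def chainStep (d : Int × Int) (res : List (Int × Int)) (lr : Int × Int) : List (Int × Int) :=
  if lr.1 ≥ (res.getLastD d).2 then res ++ [lr] else res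

def twoLargest (arr : List (Int × Int)) : List (Int × Int) :=
  match PySem.List.sorted arr (fun p => p.2) false with
  | [] => []          -- arr[0] raises IndexError on the empty list; excluded by Pre_
  | h :: t =>
    let result := t.foldl (chainStep h) [h]
    (PySem.List.sorted result (fun p => p.2 - p.1) true).take 2

-- ===== PORT B =====
-- one step of Source B's loop body; state = (last_right, best1, best2)
def altStep (st : Int × (Int × Int) × Option (Int × Int)) (iv : Int × Int) :
    Int × (Int × Int) × Option (Int × Int) :=
  if iv.1 ≥ st.1 then
    let w := iv.2 - iv.1
    let b1 := st.2.1
    if w > b1.2 - b1.1 then (iv.2, iv, some b1)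
    else
      match st.2.2 with
      | none => (iv.2, b1, some iv)
      | some b2 => if w > b2.2 - b2.1 then (iv.2, b1, some iv) else (iv.2, b1, some b2)
  else st

def twoLargest_alt (arr : List (Int × Int)) : List (Int × Int) :=
  match PySem.List.sorted arr (fun p => p.2) false with
  | [] => []          -- arr[0] raises IndexError on the empty list; excluded by Pre_
  | first :: rest =>
    let st := rest.foldl altStep (first.2, first, none)
    match st.2.2 with
    | none => [st.2.1]
    | some b2 => [st.2.1, b2]

-- ===== PRECONDITION & SPEC =====
-- Pre_ excludes only the empty list, on which A (and B) raise IndexError at arr[0]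
def Pre_twoLargest (arr : List (Int × Int)) : Prop := arr ≠ []
instance (arr : List (Int × Int)) : Decidable (Pre_twoLargest arr) := by unfold Pre_twoLargest; infer_instance
def pvWitness_twoLargest : (List (Int × Int)) := [(0, 1)]

def Spec_twoLargest (arr : List (Int × Int)) (out : List (Int × Int)) : Prop := out = twoLargest_alt arr
instance (arr : List (Int × Int)) (out : List (Int × Int)) : Decidable (Spec_twoLargest arr out) := by unfold Spec_twoLargest; infer_instance

-- ===== CLAIM (what is proved, stated in full; the proofs are below) =====
def Claim_equal_twoLargest : Prop := ∀ (arr : List (Int × Int)), Dom_twoLargest arr → Pre_twoLargest arr → Spec_twoLargest arr (twoLargest arr)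

-- ===== LEMMAS AND PROOFS =====

-- the sublist of t that the greedy loop appends, given the current last right endpoint
def extras (last : Int) : List (Int × Int) → List (Int × Int)
  | [] => []
  | x :: t => if x.1 ≥ last then x :: extras x.2 t else extras last t

-- the top-two insertion step (the inner if/elif of Source B once an interval joined the chain)
def ins (p : (Int × Int) × Option (Int × Int)) (iv : Int × Int) :
    (Int × Int) × Option (Int × Int) :=
  if iv.2 - iv.1 > p.1.2 - p.1.1 then (iv, some p.1)
  else
    match p.2 with
    | none => (p.1, some iv)
    | some b2 => if iv.2 - iv.1 > b2.2 - b2.1 then (p.1, some iv) else (p.1, some b2)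

def top2list (p : (Int × Int) × Option (Int × Int)) : List (Int × Int) :=
  match p.2 with
  | none => [p.1]
  | some b2 => [p.1, b2]

theorem altStep_eq (st : Int × (Int × Int) × Option (Int × Int)) (iv : Int × Int) :
    altStep st iv = if iv.1 ≥ st.1 then (iv.2, ins st.2 iv) else st := by
  obtain ⟨lr, b1, b2⟩ := st
  cases b2 <;> simp only [altStep, ins] <;> split_ifs <;> rfl

theorem chain_eq_extras (t : List (Int × Int)) : ∀ (res : List (Int × Int)) (d la : Int × Int),
    res.getLast? = some la →
    t.foldl (chainStep d) res = res ++ extras la.2 t := by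
  induction t with
  | nil => intro res d la _; simp [extras]
  | cons x t ih =>
    intro res d la hla
    have hgd : res.getLastD d = la := by
      cases res with
      | nil => simp at hla
      | cons a as => rw [List.getLastD_eq_getLast?, hla]; rfl
    simp only [List.foldl_cons, extras, chainStep, hgd]
    by_cases hx : x.1 ≥ la.2
    · rw [if_pos hx, if_pos hx, ih (res ++ [x]) d x (by simp), List.append_assoc]
      rfl
    · rw [if_neg hx, if_neg hx, ih res d la hla]

theorem bfold_eq_ins (t : List (Int × Int)) : ∀ (last : Int) (b : (Int × Int) × Option (Int × Int)),
    (t.foldl altStep (last, b)).2 = (extras last t).foldl ins b := by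
  induction t with
  | nil => intro last b; simp [extras]
  | cons x t ih =>
    intro last b
    simp only [List.foldl_cons, altStep_eq, extras]
    by_cases hx : x.1 ≥ last
    · rw [if_pos hx, if_pos hx]
      exact ih x.2 (ins b x)
    · rw [if_neg hx, if_neg hx]
      exact ih last b

-- taking the first two of the stable reverse-width insertion equals the top-two fold
theorem top2_eq_take2 (l : List (Int × Int)) :
    ∀ (st : (Int × Int) × Option (Int × Int)) (acc : List (Int × Int)),
    top2list st = acc.take 2 → acc ≠ [] →
    top2list (l.foldl ins st) =
      (l.foldl (fun acc x =>
        PySem.List.insertBy (fun a b => decide ((b.2 - b.1) < (a.2 - a.1))) x acc) acc).take 2 := by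
  induction l with
  | nil => intro st acc h _; simpa using h
  | cons x l ih =>
    intro st acc h hne
    simp only [List.foldl_cons]
    obtain ⟨b1, b2⟩ := st
    cases acc with
    | nil => exact absurd rfl hne
    | cons a0 rest =>
      cases b2 with
      | none =>
        -- top2list (b1, none) = [b1] = (a0 :: rest).take 2 forces rest = [] and a0 = b1
        simp only [top2list] at h
        have hr : rest = [] ∧ a0 = b1 := by
          cases rest with
          | nil => simp_all
          | cons a1 r => simp at h
        obtain ⟨hr0, hr1⟩ := hr
        subst hr0; subst hr1
        simp only [PySem.List.insertBy, ins, decide_eq_true_eq, gt_iff_lt]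
        split_ifs with hw
        · exact ih _ _ (by simp [top2list]) (by simp)
        · exact ih _ _ (by simp [top2list]) (by simp)
      | some b2 =>
        -- top2list (b1, some b2) = [b1, b2] forces acc = b1 :: b2 :: _
        simp only [top2list] at h
        cases rest with
        | nil => simp at h
        | cons a1 r =>
          have h0 : b1 = a0 ∧ b2 = a1 := by
            simpa [List.take] using h
          obtain ⟨h0, h1⟩ := h0
          subst h0; subst h1
          simp only [PySem.List.insertBy, ins, decide_eq_true_eq, gt_iff_lt]
          split_ifs with hw1 hw2
          · exact ih _ _ (by simp [top2list]) (by simp)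
          · exact ih _ _ (by simp [top2list]) (by simp)
          · exact ih _ _ (by simp [top2list]) (by simp)

-- ===== VERDICT (by name: the statement is the Claim_ definition above) =====
theorem twoLargest_spec : Claim_equal_twoLargest := by
  intro arr _ hpre
  unfold Spec_twoLargest twoLargest twoLargest_alt
  have hs : PySem.List.sorted arr (fun p => p.2) false ≠ [] := by
    rw [Ne, PySem.List.sorted_eq_nil_iff]; exact hpre
  cases hsd : PySem.List.sorted arr (fun p => p.2) false with
  | nil => exact absurd hsd hs
  | cons h t =>
    simp only []
    have hchain := chain_eq_extras t [h] h h (by simp)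
    rw [hchain]
    have hb := bfold_eq_ins t h.2 (h, none)
    rw [hb]
    rw [PySem.List.sorted_rev_eq_foldl_insertBy]
    have := top2_eq_take2 (extras h.2 t) (h, none) [h] rfl (by simp)
    simp only [List.singleton_append, List.foldl_cons, PySem.List.insertBy] at *
    rw [← this]
    cases hfin : (extras h.2 t).foldl ins (h, none) with
    | mk b1 b2 => cases b2 <;> simp [top2list]
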